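-- pv_equiv track=rewrite | github.com/mukundv/aoc | 2020/day06/day06.py | part2
-- ===== SOURCE A (Python) =====
-- def part2(data):
--     count = 0
--     for group in data:
--         line = group.splitlines()
--         counted = set(line[0])
--         for not_counted in line[1:]:
--             counted &= set(not_counted)
--         count += len(counted)
--     return count
-- ===== SOURCE B (Python) =====
-- from collections import Counter
--
--
-- def part2(data):
--     total = 0
--     for group in data:
--         lines = group.splitlines()
--         tally = Counter()
--         for ln in lines:
--             tally.update(set(ln))
--         total += sum(1 for v in tally.values() if v == len(lines))
--     return total
-- ===== Notes on version B (the rewrite author's own statement) =====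
-- stated objective: alternative
-- what changed: Per group, a Counter tallies in how many lines each distinct letter occurs and the letters whose tally equals the number of lines are counted, replacing A's running set-intersection across lines.
import Mathlib
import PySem

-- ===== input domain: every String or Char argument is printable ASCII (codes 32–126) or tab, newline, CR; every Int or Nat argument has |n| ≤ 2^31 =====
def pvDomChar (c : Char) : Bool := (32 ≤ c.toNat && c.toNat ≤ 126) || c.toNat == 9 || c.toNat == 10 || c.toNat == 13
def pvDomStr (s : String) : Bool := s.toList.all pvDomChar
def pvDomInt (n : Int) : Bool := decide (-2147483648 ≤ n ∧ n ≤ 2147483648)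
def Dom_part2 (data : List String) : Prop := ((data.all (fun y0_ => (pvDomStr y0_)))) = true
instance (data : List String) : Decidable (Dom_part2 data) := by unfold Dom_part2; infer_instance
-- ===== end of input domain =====

-- B replaces A's running set-intersection over a group's lines by a per-group tally
-- (how many lines contain each distinct letter) thresholded at the number of lines;
-- an alternative decomposition of the same cost.

-- ===== PORT A =====
def part2 (data : List String) : Int :=
  data.foldl
    (fun count group =>
      let line := PySem.Str.splitlines group
      let counted := PySem.Set.ofList (PySem.List.pyGetD line 0 "").toList
      let counted := (PySem.List.slice line (some 1)).foldl
        (fun c nc => PySem.Set.inter c (PySem.Set.ofList nc.toList)) counted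
      count + PySem.Set.len counted)
    0

-- ===== PORT B =====
def part2_alt (data : List String) : Int :=
  data.foldl
    (fun total group =>
      let lines := PySem.Str.splitlines group
      let tally : PySem.Dict Char Int :=
        lines.foldl
          (fun d ln => (PySem.Set.ofList ln.toList).foldl (fun d c => d.modify c 0 (· + 1)) d)
          PySem.Dict.empty
      total + ((tally.values.filter (fun v => v == (lines.length : Int))).length : Int))
    0

-- ===== PRECONDITION & SPEC =====
-- Pre_ excludes inputs containing an empty group string: there ''.splitlines() == [] and A
-- raises IndexError at line[0].
def Pre_part2 (data : List String) : Prop := ∀ g ∈ data, g ≠ ""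
instance (data : List String) : Decidable (Pre_part2 data) := by unfold Pre_part2; infer_instance
def pvWitness_part2 : List String := ["ab\nb", "abc\nbc\ncab"]

def Spec_part2 (data : List String) (out : Int) : Prop := out = part2_alt data
instance (data : List String) (out : Int) : Decidable (Spec_part2 data out) := by unfold Spec_part2; infer_instance

-- ===== CLAIM (what is proved, stated in full; the proofs are below) =====
def Claim_equal_part2 : Prop := ∀ (data : List String), Dom_part2 data → Pre_part2 data → Spec_part2 data (part2 data)

-- ===== LEMMAS AND PROOFS =====

-- splitlines.go never returns [] once the remaining input, the current chunk or the
-- accumulator is nonempty.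
theorem splitlines_go_ne_nil (isB : Char → Bool) (l cur : List Char) (acc : List (List Char))
    (h : l ≠ [] ∨ cur ≠ [] ∨ acc ≠ []) :
    PySem.Chars.splitlines.go isB l cur acc ≠ [] := by
  induction l, cur, acc using PySem.Chars.splitlines.go.induct isB with
  | case1 cur acc hcur =>
    rw [PySem.Chars.splitlines.go]
    simp only [hcur, if_true]
    rcases h with h | h | h
    · exact absurd rfl h
    · exact absurd (List.isEmpty_iff.mp hcur) h
    · simpa using h
  | case2 cur acc hcur =>
    rw [PySem.Chars.splitlines.go]
    simp [hcur]
  | case3 rest cur acc ih =>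
    rw [PySem.Chars.splitlines.go]
    exact ih (Or.inr (Or.inr (by simp)))
  | case4 c rest cur acc hne hB ih =>
    rw [PySem.Chars.splitlines.go]
    split
    · exact ih (Or.inr (Or.inr (by simp)))
    · rename_i hf; exact absurd hB hf
    · exact hne
  | case5 c rest cur acc hne hB ih =>
    rw [PySem.Chars.splitlines.go]
    split
    · rename_i ht; exact absurd ht hB
    · exact ih (Or.inr (Or.inl (by simp)))
    · exact hne

theorem chars_splitlines_ne_nil (l : List Char) (hl : l ≠ []) :
    PySem.Chars.splitlines l ≠ [] := by
  rw [PySem.Chars.splitlines]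
  exact splitlines_go_ne_nil _ l [] [] (Or.inl hl)

theorem splitlines_ne_nil (g : String) (h : g ≠ "") : PySem.Str.splitlines g ≠ [] := by
  intro hc
  rw [PySem.Str.splitlines, List.map_eq_nil_iff] at hc
  exact chars_splitlines_ne_nil g.toList
    (by simpa [String.toList_eq_nil_iff] using h) hc

theorem mem_foldl_inter (rest : List String) (s : PySem.Set Char) (c : Char) :
    c ∈ rest.foldl (fun c nc => PySem.Set.inter c (PySem.Set.ofList nc.toList)) s ↔
      c ∈ s ∧ ∀ l ∈ rest, c ∈ l.toList := by
  induction rest generalizing s with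
  | nil => simp
  | cons x xs ih =>
    simp only [List.foldl_cons, ih, PySem.Set.mem_inter, PySem.Set.mem_ofList, List.mem_cons]
    constructor
    · rintro ⟨⟨h1, h2⟩, h3⟩
      exact ⟨h1, fun l hl => hl.elim (fun e => e ▸ h2) (h3 l)⟩
    · rintro ⟨h1, h2⟩
      exact ⟨⟨h1, h2 x (Or.inl rfl)⟩, fun l hl => h2 l (Or.inr hl)⟩

theorem nodup_foldl_inter (rest : List String) (s : PySem.Set Char) (hs : s.Nodup) :
    (rest.foldl (fun c nc => PySem.Set.inter c (PySem.Set.ofList nc.toList)) s).Nodup := by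
  induction rest generalizing s with
  | nil => exact hs
  | cons x xs ih => exact ih _ (List.Nodup.filter _ hs)

theorem count_nodup_eq (s : List Char) (hs : s.Nodup) (c : Char) :
    s.count c = if c ∈ s then 1 else 0 := by
  split
  · rename_i hmem
    have h1 : s.count c ≤ 1 := List.nodup_iff_count_le_one.mp hs c
    have h2 : 0 < s.count c := List.count_pos_iff.mpr hmem
    omega
  · rename_i hmem
    exact List.count_eq_zero.mpr hmem

theorem count_flatMap_sets (lines : List String) (c : Char) :
    (lines.flatMap (fun ln => PySem.Set.ofList ln.toList)).count c =
      lines.countP (fun ln => decide (c ∈ ln.toList)) := by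
  induction lines with
  | nil => rfl
  | cons x xs ih =>
    rw [List.flatMap_cons, List.count_append, ih, List.countP_cons,
      count_nodup_eq _ (PySem.Set.nodup_ofList _) c]
    simp [PySem.Set.mem_ofList]
    by_cases h : c ∈ x.toList
    · simp [h]; omega
    · simp [h]

-- per-group equality: length of the running intersection = number of tally values
-- equal to the number of lines
theorem group_eq (lines : List String) (h : lines ≠ []) :
    PySem.Set.len
        ((PySem.List.slice lines (some 1)).foldl
          (fun c nc => PySem.Set.inter c (PySem.Set.ofList nc.toList))
          (PySem.Set.ofList (PySem.List.pyGetD lines 0 "").toList)) =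
      (((lines.foldl
            (fun d ln => (PySem.Set.ofList ln.toList).foldl (fun d c => d.modify c 0 (· + 1)) d)
            PySem.Dict.empty).values.filter (fun v => v == (lines.length : Int))).length : Int) := by
  obtain ⟨l0, rest, rfl⟩ : ∃ l0 rest, lines = l0 :: rest := by
    cases lines with
    | nil => exact absurd rfl h
    | cons a b => exact ⟨a, b, rfl⟩
  -- right side is a counter over the concatenated per-line sets
  have htally : ((l0 :: rest).foldl
        (fun d ln => (PySem.Set.ofList ln.toList).foldl (fun d c => d.modify c 0 (· + 1)) d)
        PySem.Dict.empty) =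
      PySem.Dict.counter ((l0 :: rest).flatMap (fun ln => PySem.Set.ofList ln.toList)) := by
    rw [PySem.Dict.counter_eq_foldl, List.foldl_flatMap]
  rw [htally]
  set Y := (l0 :: rest).flatMap (fun ln => PySem.Set.ofList ln.toList) with hY
  -- simplify slice and pyGetD
  have hslice : PySem.List.slice (l0 :: rest) (some 1) = rest := by
    rw [PySem.List.slice_from _ (by norm_num)]; rfl
  have hget : PySem.List.pyGetD (l0 :: rest) 0 "" = l0 := by
    rw [show (0 : Int) = ((0 : Nat) : Int) from rfl, PySem.List.pyGetD_natCast]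
    rfl
  rw [hslice, hget]
  -- right side values/filter
  rw [PySem.Dict.values, PySem.Dict.items_counter, List.map_map, List.filter_map,
    List.length_map]
  -- both sides are lengths of nodup lists with the same membership
  have hmemL : ∀ c, c ∈ rest.foldl (fun c nc => PySem.Set.inter c (PySem.Set.ofList nc.toList))
      (PySem.Set.ofList l0.toList) ↔ ∀ l ∈ (l0 :: rest), c ∈ l.toList := by
    intro c
    rw [mem_foldl_inter]
    simp [PySem.Set.mem_ofList]
  have hmemR : ∀ c, c ∈ (PySem.Set.ofList Y).filter
      ((fun v => v == ((l0 :: rest).length : Int)) ∘ (Prod.snd ∘ fun k => (k, (Y.count k : Int)))) ↔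
      ∀ l ∈ (l0 :: rest), c ∈ l.toList := by
    intro c
    rw [List.mem_filter]
    have hcnt : Y.count c = (l0 :: rest).countP (fun ln => decide (c ∈ ln.toList)) :=
      count_flatMap_sets _ c
    constructor
    · rintro ⟨hmem, hv⟩
      simp only [Function.comp, beq_iff_eq] at hv
      have : Y.count c = (l0 :: rest).length := by exact_mod_cast hv
      rw [hcnt] at this
      have := List.countP_eq_length.mp this
      intro l hl
      simpa using this l hl
    · intro hall
      have hmem : c ∈ PySem.Set.ofList Y := by
        rw [PySem.Set.mem_ofList, hY]
        exact List.mem_flatMap.mpr ⟨l0, by simp, by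
          rw [PySem.Set.mem_ofList]; exact hall l0 (by simp)⟩
      refine ⟨hmem, ?_⟩
      simp only [Function.comp, beq_iff_eq]
      have : Y.count c = (l0 :: rest).length := by
        rw [hcnt]
        exact List.countP_eq_length.mpr (fun l hl => by simpa using hall l hl)
      exact_mod_cast this
  have hperm : (rest.foldl (fun c nc => PySem.Set.inter c (PySem.Set.ofList nc.toList))
      (PySem.Set.ofList l0.toList)).Perm
      ((PySem.Set.ofList Y).filter
        ((fun v => v == ((l0 :: rest).length : Int)) ∘ (Prod.snd ∘ fun k => (k, (Y.count k : Int))))) := by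
    refine (List.perm_ext_iff_of_nodup ?_ ?_).mpr (fun c => by rw [hmemL c, hmemR c])
    · exact nodup_foldl_inter _ _ (PySem.Set.nodup_ofList _)
    · exact List.Nodup.filter _ (PySem.Set.nodup_ofList _)
  rw [PySem.Set.len, hperm.length_eq]

-- ===== VERDICT (by name: the statement is the Claim_ definition above) =====
theorem part2_spec : Claim_equal_part2 := by
  intro data _ hpre
  unfold Spec_part2 part2 part2_alt
  exact PySem.List.foldl_congr_mem data _ _ 0 (fun acc g hg => by
    have := group_eq (PySem.Str.splitlines g) (splitlines_ne_nil g (hpre g hg))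
    simpa using congrArg (acc + ·) this)
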